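-- pv_equiv track=rewrite | github.com/rameshreddyg0/learning | scripts/common.py | identifyChangedPolicyType
-- ===== SOURCE A (Python) =====
-- def identifyChangedPolicyType(branch, changeSets):
--     changedPolicyType = []
--     if branch.startswith('feature/'):
--         #TODO Run this test with a reg ex to identify the cloud provider and policy type
--         # Create a multi dimensional dict to store data as {"gcp":{"sentinel","native"}, "aws":{"prisma"}}
--         for changeSet in changeSets:
--             if changeSet.startswith('gcp/sentinel') or changeSet.startswith('aws/sentinel') or changeSet.startswith('azure/sentinel'):
--                 changedPolicyType.append("sentinel")
--             elif changeSet.startswith('gcp/native') or changeSet.startswith('aws/native') or changeSet.startswith('azure/native'):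
--                 changedPolicyType.append("native")
--             elif changeSet.startswith('gcp/prisma') or changeSet.startswith('aws/prisma') or changeSet.startswith('azure/prisma'):
--                 changedPolicyType.append("prisma")
--     else:
--         changedPolicyType.append("all")
--     return changedPolicyType
-- ===== SOURCE B (Python) =====
-- PROVIDERS = ('gcp/', 'aws/', 'azure/')
-- TYPES = ('sentinel', 'native', 'prisma')
--
--
-- def _policy_type(path):
--     """Parse the path: strip the provider segment, then classify the remainder."""
--     for pre in PROVIDERS:
--         if path.startswith(pre):
--             rest = path.removeprefix(pre)
--             for t in TYPES:
--                 if rest.startswith(t):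
--                     return t
--             return None
--     return None
--
--
-- def identifyChangedPolicyType(branch, changeSets):
--     if not branch.startswith('feature/'):
--         return ['all']
--     return [t for t in map(_policy_type, changeSets) if t is not None]
-- ===== Notes on version B (the rewrite author's own statement) =====
-- stated objective: simpler
-- what changed: Replaces A's flat if/elif chain of nine hardcoded provider/type prefix tests with a path parser: strip the provider segment with removeprefix, classify the remainder against the three type names, and build the result as a filtered map over changeSets instead of an accumulator loop.
import Mathlib
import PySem

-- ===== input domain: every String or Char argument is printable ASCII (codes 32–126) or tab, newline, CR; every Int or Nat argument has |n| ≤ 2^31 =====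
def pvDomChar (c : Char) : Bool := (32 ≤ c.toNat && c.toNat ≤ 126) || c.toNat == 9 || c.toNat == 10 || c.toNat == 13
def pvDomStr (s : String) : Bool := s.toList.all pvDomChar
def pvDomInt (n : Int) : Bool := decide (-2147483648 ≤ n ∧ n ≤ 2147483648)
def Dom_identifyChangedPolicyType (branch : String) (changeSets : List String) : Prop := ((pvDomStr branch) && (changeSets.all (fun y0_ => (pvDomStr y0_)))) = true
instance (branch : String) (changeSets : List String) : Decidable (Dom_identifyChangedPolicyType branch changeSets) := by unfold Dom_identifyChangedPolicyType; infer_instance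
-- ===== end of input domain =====

-- B replaces A's flat nine-prefix if/elif chain by a path parser: strip the provider
-- segment, classify the remainder, then build the result as a filtered map (objective: simpler).

-- ===== PORT A =====
def identifyChangedPolicyType (branch : String) (changeSets : List String) : List String :=
  if PySem.Str.startswith branch "feature/" then
    changeSets.foldl (fun changedPolicyType changeSet =>
      if PySem.Str.startswith changeSet "gcp/sentinel" || PySem.Str.startswith changeSet "aws/sentinel" || PySem.Str.startswith changeSet "azure/sentinel" then
        changedPolicyType ++ ["sentinel"]
      else if PySem.Str.startswith changeSet "gcp/native" || PySem.Str.startswith changeSet "aws/native" || PySem.Str.startswith changeSet "azure/native" then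
        changedPolicyType ++ ["native"]
      else if PySem.Str.startswith changeSet "gcp/prisma" || PySem.Str.startswith changeSet "aws/prisma" || PySem.Str.startswith changeSet "azure/prisma" then
        changedPolicyType ++ ["prisma"]
      else changedPolicyType) []
  else ["all"]

-- ===== PORT B =====
-- Source B's _policy_type: the 'for … return' loops are first-match searches (List.find?);
-- path.removeprefix(pre) after a successful startswith test is exactly dropping pre's characters.
def pvPolicyType (path : String) : Option String :=
  match ["gcp/", "aws/", "azure/"].find? (fun pre => PySem.Str.startswith path pre) with
  | some pre =>
      let rest : String := String.ofList (path.toList.drop pre.toList.length)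
      ["sentinel", "native", "prisma"].find? (fun t => PySem.Str.startswith rest t)
  | none => none

def identifyChangedPolicyType_alt (branch : String) (changeSets : List String) : List String :=
  if !(PySem.Str.startswith branch "feature/") then ["all"]
  else ((changeSets.map pvPolicyType).filterMap id)

-- ===== PRECONDITION & SPEC =====
def Spec_identifyChangedPolicyType (branch : String) (changeSets : List String) (out : List String) : Prop := out = identifyChangedPolicyType_alt branch changeSets
instance (branch : String) (changeSets : List String) (out : List String) : Decidable (Spec_identifyChangedPolicyType branch changeSets out) := by unfold Spec_identifyChangedPolicyType; infer_instance

-- ===== CLAIM =====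
def Claim_equal_identifyChangedPolicyType : Prop := ∀ (branch : String) (changeSets : List String), Dom_identifyChangedPolicyType branch changeSets → Spec_identifyChangedPolicyType branch changeSets (identifyChangedPolicyType branch changeSets)

-- ===== LEMMAS AND PROOFS =====

-- if s starts with a, then s starts with a ++ b iff what is left after a starts with b
theorem pv_sw_append (s a b : List Char) (h : PySem.Chars.startswith s a = true) :
    PySem.Chars.startswith s (a ++ b) = PySem.Chars.startswith (s.drop a.length) b := by
  obtain ⟨t, rfl⟩ := (PySem.Chars.startswith_iff s a).mp h
  rw [Bool.eq_iff_iff, PySem.Chars.startswith_iff, PySem.Chars.startswith_iff,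
    List.drop_left, List.prefix_append_right_inj]

-- s cannot start with b when it starts with a and a, b are prefix-incomparable
theorem pv_sw_conflict (s a b : List Char) (h : PySem.Chars.startswith s a = true)
    (hab : PySem.Chars.startswith b a = false) (hba : PySem.Chars.startswith a b = false) :
    PySem.Chars.startswith s b = false := by
  cases hsb : PySem.Chars.startswith s b with
  | false => rfl
  | true =>
    exfalso
    have ha := (PySem.Chars.startswith_iff s a).mp h
    have hb := (PySem.Chars.startswith_iff s b).mp hsb
    rcases List.prefix_or_prefix_of_prefix ha hb with h1 | h1
    · rw [← PySem.Chars.startswith_iff] at h1; simp [hab] at h1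
    · rw [← PySem.Chars.startswith_iff] at h1; simp [hba] at h1

-- contrapositive helper: no provider prefix ⇒ no provider/type prefix
theorem pv_sw_mono (s a b : List Char) (h : PySem.Chars.startswith s a = false) :
    PySem.Chars.startswith s (a ++ b) = false := by
  cases hs : PySem.Chars.startswith s (a ++ b) with
  | false => rfl
  | true =>
    exfalso
    have := (PySem.Chars.startswith_iff s (a ++ b)).mp hs
    have : a <+: s := ((a.prefix_append b).trans this)
    rw [← PySem.Chars.startswith_iff] at this; simp [h] at this

-- A's per-element if/elif chain appends exactly B's classification of the element
theorem pv_step_eq (acc : List String) (cs : String) :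
    (if PySem.Str.startswith cs "gcp/sentinel" || PySem.Str.startswith cs "aws/sentinel" || PySem.Str.startswith cs "azure/sentinel" then
        acc ++ ["sentinel"]
      else if PySem.Str.startswith cs "gcp/native" || PySem.Str.startswith cs "aws/native" || PySem.Str.startswith cs "azure/native" then
        acc ++ ["native"]
      else if PySem.Str.startswith cs "gcp/prisma" || PySem.Str.startswith cs "aws/prisma" || PySem.Str.startswith cs "azure/prisma" then
        acc ++ ["prisma"]
      else acc)
    = acc ++ (pvPolicyType cs).toList := by
  simp only [PySem.Str.startswith_eq]
  simp only [show ("gcp/sentinel".toList) = "gcp/".toList ++ "sentinel".toList from rfl,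
    show ("gcp/native".toList) = "gcp/".toList ++ "native".toList from rfl,
    show ("gcp/prisma".toList) = "gcp/".toList ++ "prisma".toList from rfl,
    show ("aws/sentinel".toList) = "aws/".toList ++ "sentinel".toList from rfl,
    show ("aws/native".toList) = "aws/".toList ++ "native".toList from rfl,
    show ("aws/prisma".toList) = "aws/".toList ++ "prisma".toList from rfl,
    show ("azure/sentinel".toList) = "azure/".toList ++ "sentinel".toList from rfl,
    show ("azure/native".toList) = "azure/".toList ++ "native".toList from rfl,
    show ("azure/prisma".toList) = "azure/".toList ++ "prisma".toList from rfl]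
  by_cases h1 : PySem.Chars.startswith cs.toList "gcp/".toList = true
  · have e1 := pv_sw_append cs.toList "gcp/".toList "sentinel".toList h1
    have e2 := pv_sw_append cs.toList "gcp/".toList "native".toList h1
    have e3 := pv_sw_append cs.toList "gcp/".toList "prisma".toList h1
    have f1 := pv_sw_conflict cs.toList "gcp/".toList ("aws/".toList ++ "sentinel".toList) h1 (by decide) (by decide)
    have f2 := pv_sw_conflict cs.toList "gcp/".toList ("azure/".toList ++ "sentinel".toList) h1 (by decide) (by decide)
    have f3 := pv_sw_conflict cs.toList "gcp/".toList ("aws/".toList ++ "native".toList) h1 (by decide) (by decide)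
    have f4 := pv_sw_conflict cs.toList "gcp/".toList ("azure/".toList ++ "native".toList) h1 (by decide) (by decide)
    have f5 := pv_sw_conflict cs.toList "gcp/".toList ("aws/".toList ++ "prisma".toList) h1 (by decide) (by decide)
    have f6 := pv_sw_conflict cs.toList "gcp/".toList ("azure/".toList ++ "prisma".toList) h1 (by decide) (by decide)
    simp only [e1, e2, e3, f1, f2, f3, f4, f5, f6]
    simp only [pvPolicyType, List.find?, PySem.Str.startswith_eq, h1, String.toList_ofList, Bool.or_false]
    cases hs : PySem.Chars.startswith (cs.toList.drop "gcp/".toList.length) "sentinel".toList <;>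
      cases hn : PySem.Chars.startswith (cs.toList.drop "gcp/".toList.length) "native".toList <;>
        cases hp : PySem.Chars.startswith (cs.toList.drop "gcp/".toList.length) "prisma".toList <;>
          simp [hs, hn, hp]
  · simp only [Bool.not_eq_true] at h1
    by_cases h2 : PySem.Chars.startswith cs.toList "aws/".toList = true
    · have e1 := pv_sw_append cs.toList "aws/".toList "sentinel".toList h2
      have e2 := pv_sw_append cs.toList "aws/".toList "native".toList h2
      have e3 := pv_sw_append cs.toList "aws/".toList "prisma".toList h2
      have f1 := pv_sw_mono cs.toList "gcp/".toList "sentinel".toList h1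
      have f2 := pv_sw_mono cs.toList "gcp/".toList "native".toList h1
      have f3 := pv_sw_mono cs.toList "gcp/".toList "prisma".toList h1
      have g1 := pv_sw_conflict cs.toList "aws/".toList ("azure/".toList ++ "sentinel".toList) h2 (by decide) (by decide)
      have g2 := pv_sw_conflict cs.toList "aws/".toList ("azure/".toList ++ "native".toList) h2 (by decide) (by decide)
      have g3 := pv_sw_conflict cs.toList "aws/".toList ("azure/".toList ++ "prisma".toList) h2 (by decide) (by decide)
      simp only [e1, e2, e3, f1, f2, f3, g1, g2, g3]
      simp only [pvPolicyType, List.find?, PySem.Str.startswith_eq, h1, h2, String.toList_ofList, Bool.or_false]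
      cases hs : PySem.Chars.startswith (cs.toList.drop "aws/".toList.length) "sentinel".toList <;>
        cases hn : PySem.Chars.startswith (cs.toList.drop "aws/".toList.length) "native".toList <;>
          cases hp : PySem.Chars.startswith (cs.toList.drop "aws/".toList.length) "prisma".toList <;>
            simp [hs, hn, hp]
    · simp only [Bool.not_eq_true] at h2
      by_cases h3 : PySem.Chars.startswith cs.toList "azure/".toList = true
      · have e1 := pv_sw_append cs.toList "azure/".toList "sentinel".toList h3
        have e2 := pv_sw_append cs.toList "azure/".toList "native".toList h3
        have e3 := pv_sw_append cs.toList "azure/".toList "prisma".toList h3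
        have f1 := pv_sw_mono cs.toList "gcp/".toList "sentinel".toList h1
        have f2 := pv_sw_mono cs.toList "gcp/".toList "native".toList h1
        have f3 := pv_sw_mono cs.toList "gcp/".toList "prisma".toList h1
        have g1 := pv_sw_mono cs.toList "aws/".toList "sentinel".toList h2
        have g2 := pv_sw_mono cs.toList "aws/".toList "native".toList h2
        have g3 := pv_sw_mono cs.toList "aws/".toList "prisma".toList h2
        simp only [e1, e2, e3, f1, f2, f3, g1, g2, g3]
        simp only [pvPolicyType, List.find?, PySem.Str.startswith_eq, h1, h2, h3, String.toList_ofList, Bool.or_false]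
        cases hs : PySem.Chars.startswith (cs.toList.drop "azure/".toList.length) "sentinel".toList <;>
          cases hn : PySem.Chars.startswith (cs.toList.drop "azure/".toList.length) "native".toList <;>
            cases hp : PySem.Chars.startswith (cs.toList.drop "azure/".toList.length) "prisma".toList <;>
              simp [hs, hn, hp]
      · simp only [Bool.not_eq_true] at h3
        have f1 := pv_sw_mono cs.toList "gcp/".toList "sentinel".toList h1
        have f2 := pv_sw_mono cs.toList "gcp/".toList "native".toList h1
        have f3 := pv_sw_mono cs.toList "gcp/".toList "prisma".toList h1
        have g1 := pv_sw_mono cs.toList "aws/".toList "sentinel".toList h2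
        have g2 := pv_sw_mono cs.toList "aws/".toList "native".toList h2
        have g3 := pv_sw_mono cs.toList "aws/".toList "prisma".toList h2
        have k1 := pv_sw_mono cs.toList "azure/".toList "sentinel".toList h3
        have k2 := pv_sw_mono cs.toList "azure/".toList "native".toList h3
        have k3 := pv_sw_mono cs.toList "azure/".toList "prisma".toList h3
        simp only [f1, f2, f3, g1, g2, g3, k1, k2, k3]
        simp only [pvPolicyType, List.find?, PySem.Str.startswith_eq, h1, h2, h3]
        simp

-- A's accumulator fold = acc ++ B's filtered map
theorem pv_fold_eq (l : List String) (acc : List String) :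
    l.foldl (fun changedPolicyType changeSet =>
      if PySem.Str.startswith changeSet "gcp/sentinel" || PySem.Str.startswith changeSet "aws/sentinel" || PySem.Str.startswith changeSet "azure/sentinel" then
        changedPolicyType ++ ["sentinel"]
      else if PySem.Str.startswith changeSet "gcp/native" || PySem.Str.startswith changeSet "aws/native" || PySem.Str.startswith changeSet "azure/native" then
        changedPolicyType ++ ["native"]
      else if PySem.Str.startswith changeSet "gcp/prisma" || PySem.Str.startswith changeSet "aws/prisma" || PySem.Str.startswith changeSet "azure/prisma" then
        changedPolicyType ++ ["prisma"]
      else changedPolicyType) acc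
    = acc ++ ((l.map pvPolicyType).filterMap id) := by
  induction l generalizing acc with
  | nil => simp
  | cons x xs ih =>
    simp only [List.foldl_cons, List.map_cons, List.filterMap_cons]
    rw [pv_step_eq acc x, ih]
    cases pvPolicyType x <;> simp

-- ===== VERDICT =====
theorem identifyChangedPolicyType_spec : Claim_equal_identifyChangedPolicyType := by
  intro branch changeSets _
  unfold Spec_identifyChangedPolicyType identifyChangedPolicyType identifyChangedPolicyType_alt
  cases h : PySem.Str.startswith branch "feature/" with
  | false => rfl
  | true =>
    simp only [Bool.not_true, Bool.false_eq_true, if_false, if_true]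
    simpa using pv_fold_eq changeSets []
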